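-- pv_equiv track=rewrite | github.com/willfriel1003/kmer-counter-WF | main.py | extract_kmer_context
-- ===== SOURCE A (Python) =====
-- def extract_kmer_context(sequence, k):
--     """
--     This function finds every k-mer in the sequence and counts what characters come after it.
--     It returns a dictionary where each k-mer maps to another dictionary of next characters.
--     Example:
--       {
--         'AT': {'G': 2},
--         'TG': {'C': 1, 'T': 1}
--       }
--     """
--     kmer_counts = {}
--
--     # Go through the sequence and collect k-mers and their next characters
--     for i in range(len(sequence) - k):
--         kmer = sequence[i:i+k]            # The k-mer
--         next_char = sequence[i+k]         # The character that comes right after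
--
--         # If the k-mer is not in the dictionary yet, add it
--         if kmer not in kmer_counts:
--             kmer_counts[kmer] = {}
--
--         # If the next character is not counted yet for this k-mer, add it
--         if next_char not in kmer_counts[kmer]:
--             kmer_counts[kmer][next_char] = 0
--
--         # Add 1 to the count for this next character
--         kmer_counts[kmer][next_char] = kmer_counts[kmer][next_char] + 1
--
--     return kmer_counts
-- ===== SOURCE B (Python) =====
-- def extract_kmer_context(sequence, k):
--     # Phase 1: collect every (kmer, next_char) pair in one flat list.
--     pairs = [(sequence[i:i+k], sequence[i+k]) for i in range(len(sequence) - k)]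
--     # Phase 2: group the next-characters by kmer (first-occurrence order).
--     groups = {}
--     for kmer, c in pairs:
--         groups.setdefault(kmer, []).append(c)
--     # Phase 3: count each group's characters.
--     result = {}
--     for kmer, chars in groups.items():
--         counts = {}
--         for c in chars:
--             counts[c] = counts.get(c, 0) + 1
--         result[kmer] = counts
--     return result
-- ===== Notes on version B (the rewrite author's own statement) =====
-- stated objective: alternative
-- what changed: Replaces A's single pass of incremental nested-dict updates with a three-phase pipeline: build the flat list of (kmer, next_char) pairs, group next-characters by kmer into lists, then count each group's list; both phases preserve first-occurrence order so the returned dict is identical.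
import Mathlib
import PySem

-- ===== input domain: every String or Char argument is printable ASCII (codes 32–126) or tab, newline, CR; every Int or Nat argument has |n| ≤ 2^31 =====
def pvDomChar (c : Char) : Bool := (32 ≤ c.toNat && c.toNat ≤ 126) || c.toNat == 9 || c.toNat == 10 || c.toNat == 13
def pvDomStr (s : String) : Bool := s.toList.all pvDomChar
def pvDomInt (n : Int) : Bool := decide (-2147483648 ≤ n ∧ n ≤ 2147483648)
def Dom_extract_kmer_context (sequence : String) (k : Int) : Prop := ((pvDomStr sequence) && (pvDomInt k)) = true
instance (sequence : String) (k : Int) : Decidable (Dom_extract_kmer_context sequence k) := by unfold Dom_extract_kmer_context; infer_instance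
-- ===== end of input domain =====

-- B replaces A's single-pass nested-dict updates with a collect-pairs / group-by-kmer /
-- count-each-group pipeline (alternative decomposition, same cost and same result).


-- ===== PORT A =====
-- sequence[i+k] as a 1-character string; none = IndexError, excluded by Pre_ (getD "" never fires inside Pre_)
def pvNextChar (sequence : String) (j : Int) : String :=
  ((PySem.Str.pyGet? sequence j).map (fun c => String.ofList [c])).getD ""

def extract_kmer_context (sequence : String) (k : Int) : List (String × List (String × Int)) :=
  let kmer_counts :=
    (PySem.List.pyRange 0 (PySem.Str.len sequence - k) 1).foldl (fun kmer_counts i =>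
      let kmer := PySem.Str.slice sequence (some i) (some (i + k))
      let next_char := pvNextChar sequence (i + k)
      let kmer_counts :=
        if kmer_counts.contains kmer then kmer_counts
        else kmer_counts.insert kmer PySem.Dict.empty
      let inner := kmer_counts.getD kmer PySem.Dict.empty
      let inner := if inner.contains next_char then inner else inner.insert next_char 0
      kmer_counts.insert kmer (inner.insert next_char (inner.getD next_char 0 + 1)))
      PySem.Dict.empty
  kmer_counts.items.map (fun p => (p.1, p.2.items))

-- ===== PORT B =====
def extract_kmer_context_alt (sequence : String) (k : Int) : List (String × List (String × Int)) :=
  let pairs := (PySem.List.pyRange 0 (PySem.Str.len sequence - k) 1).map (fun i =>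
    (PySem.Str.slice sequence (some i) (some (i + k)), pvNextChar sequence (i + k)))
  -- groups.setdefault(kmer, []).append(c)  ==  groups[kmer] = groups.get(kmer, []) + [c]  ==  Dict.modify
  let groups := pairs.foldl (fun g p => g.modify p.1 [] (fun l => l ++ [p.2])) PySem.Dict.empty
  let result := groups.items.foldl (fun r p =>
      r.insert p.1 (p.2.foldl (fun cd c => cd.insert c (cd.getD c 0 + 1)) PySem.Dict.empty))
      PySem.Dict.empty
  result.items.map (fun p => (p.1, p.2.items))

-- ===== PRECONDITION & SPEC =====
-- Pre_ excludes exactly the inputs where the Python A raises IndexError: k < -len(sequence)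
-- (then i = 0 already reads sequence[k] out of range).
def Pre_extract_kmer_context (sequence : String) (k : Int) : Prop :=
  -(PySem.Str.len sequence) ≤ k
instance (sequence : String) (k : Int) : Decidable (Pre_extract_kmer_context sequence k) := by
  unfold Pre_extract_kmer_context; infer_instance

def pvWitness_extract_kmer_context : String × Int := ("ATGATC", 2)

def Spec_extract_kmer_context (sequence : String) (k : Int) (out : List (String × List (String × Int))) : Prop := out = extract_kmer_context_alt sequence k
instance (sequence : String) (k : Int) (out : List (String × List (String × Int))) : Decidable (Spec_extract_kmer_context sequence k out) := by unfold Spec_extract_kmer_context; infer_instance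

-- ===== CLAIM (what is proved, stated in full; the proofs are below) =====
def Claim_equal_extract_kmer_context : Prop := ∀ (sequence : String) (k : Int), Dom_extract_kmer_context sequence k → Pre_extract_kmer_context sequence k → Spec_extract_kmer_context sequence k (extract_kmer_context sequence k)

-- ===== LEMMAS AND PROOFS =====

-- A's loop body is one nested Dict.modify.
theorem pvStepA_eq (d : PySem.Dict String (PySem.Dict String Int)) (km c : String) :
    (let d1 := if d.contains km then d else d.insert km PySem.Dict.empty
     let inner := d1.getD km PySem.Dict.empty
     let inner1 := if inner.contains c then inner else inner.insert c 0
     d1.insert km (inner1.insert c (inner1.getD c 0 + 1)))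
    = d.modify km PySem.Dict.empty (fun inner => inner.modify c 0 (· + 1)) := by
  simp only []
  by_cases hk : d.contains km
  · simp only [hk, if_pos]
    by_cases hc : (d.getD km PySem.Dict.empty).contains c
    · simp [hc, PySem.Dict.modify]
    · simp [hc, PySem.Dict.modify, PySem.Dict.insert_insert_self, PySem.Dict.getD_insert_self,
        PySem.Dict.getD_of_not_contains _ _ (by simpa using hc)]
  · simp [hk, PySem.Dict.modify, PySem.Dict.getD_insert_self, PySem.Dict.insert_insert_self,
      PySem.Dict.getD_of_not_contains _ (PySem.Dict.empty : PySem.Dict String Int) (by simpa using hk)]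

-- lookups through mapping a function over a dict's values
theorem pvGet?_mapV (F : List String → PySem.Dict String Int) (g : PySem.Dict String (List String)) (km : String) :
    (PySem.Dict.mk (g.items.map (fun p => (p.1, F p.2)))).get? km = (g.get? km).map F := by
  simp [PySem.Dict.get?, Option.map_map]
  rfl

theorem pvContains_mapV (F : List String → PySem.Dict String Int) (g : PySem.Dict String (List String)) (km : String) :
    (PySem.Dict.mk (g.items.map (fun p => (p.1, F p.2)))).contains km = g.contains km := by
  simp only [PySem.Dict.contains, List.any_map]
  rfl

theorem pvGetD_mapV (F : List String → PySem.Dict String Int) (hnil : F [] = PySem.Dict.empty)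
    (g : PySem.Dict String (List String)) (km : String) :
    (PySem.Dict.mk (g.items.map (fun p => (p.1, F p.2)))).getD km PySem.Dict.empty
    = F (g.getD km []) := by
  simp only [PySem.Dict.getD, pvGet?_mapV]
  cases g.get? km <;> simp [hnil]

-- mapping F over the values commutes with one grouping step (φ the matching step on counters)
theorem pvMapV_modify (F : List String → PySem.Dict String Int) (φ : PySem.Dict String Int → PySem.Dict String Int)
    (f : List String → List String) (hcomm : ∀ v, φ (F v) = F (f v)) (hnil : F [] = PySem.Dict.empty)
    (g : PySem.Dict String (List String)) (km : String) :
    PySem.Dict.mk ((g.modify km [] f).items.map (fun p => (p.1, F p.2)))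
    = (PySem.Dict.mk (g.items.map (fun p => (p.1, F p.2)))).modify km PySem.Dict.empty φ := by
  rw [PySem.Dict.modify, PySem.Dict.modify, pvGetD_mapV F hnil, hcomm]
  by_cases h : g.contains km
  · simp only [PySem.Dict.insert, h, pvContains_mapV, if_pos]
    congr 1
    simp only [List.map_map]
    apply List.map_congr_left
    intro p _
    by_cases hp : p.1 = km <;> simp [hp]
  · simp only [PySem.Dict.insert, h, pvContains_mapV, Bool.false_eq_true, if_false]
    simp [PySem.Dict.getD_of_not_contains _ _ (by simpa using h)]

-- fold fusion: A's fold over the pairs is `counter` mapped over B's grouping fold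
theorem pvFusion (P : List (String × String)) (g : PySem.Dict String (List String)) :
    P.foldl (fun d p => d.modify p.1 PySem.Dict.empty (fun inner => inner.modify p.2 0 (· + 1)))
      (PySem.Dict.mk (g.items.map (fun q => (q.1, PySem.Dict.counter q.2))))
    = PySem.Dict.mk ((P.foldl (fun g p => g.modify p.1 [] (fun l => l ++ [p.2])) g).items.map
        (fun q => (q.1, PySem.Dict.counter q.2))) := by
  induction P generalizing g with
  | nil => rfl
  | cons p P ih =>
      rw [List.foldl_cons, List.foldl_cons,
        ← pvMapV_modify PySem.Dict.counter (fun cd => cd.modify p.2 0 (· + 1)) (fun l => l ++ [p.2])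
          (fun v => (PySem.Dict.counter_append_singleton v p.2).symm) rfl g p.1]
      exact ih _

-- the grouping fold keeps the keys list duplicate-free
theorem pvKeys_modify (g : PySem.Dict String (List String)) (km : String) (f : List String → List String) :
    (g.modify km [] f).items.map Prod.fst
    = if g.contains km then g.items.map Prod.fst else g.items.map Prod.fst ++ [km] := by
  by_cases h : g.contains km
  · simp only [PySem.Dict.modify, PySem.Dict.insert, h, if_pos]
    simp only [List.map_map]
    apply List.map_congr_left
    intro p _
    by_cases hp : p.1 = km <;> simp [hp]
  · simp [PySem.Dict.modify, PySem.Dict.insert, h]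

theorem pvKeys_nodup (P : List (String × String)) (g : PySem.Dict String (List String))
    (h : (g.items.map Prod.fst).Nodup) :
    (((P.foldl (fun g p => g.modify p.1 [] (fun l => l ++ [p.2])) g).items.map Prod.fst)).Nodup := by
  induction P generalizing g with
  | nil => exact h
  | cons p P ih =>
      rw [List.foldl_cons]
      apply ih
      rw [pvKeys_modify]
      by_cases hc : g.contains p.1
      · simpa [hc] using h
      · have : p.1 ∉ g.items.map Prod.fst := by
          simp only [PySem.Dict.contains] at hc
          simpa [List.any_eq_true] using hc
        simp only [hc, Bool.false_eq_true, if_false, List.nodup_append, List.nodup_cons,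
          List.not_mem_nil, not_false_iff, List.nodup_nil, true_and, and_true]
        refine ⟨h, ?_⟩
        intro a ha b hb
        rw [List.mem_singleton] at hb
        exact fun e => this (hb ▸ e ▸ ha)

-- rebuilding a dict with nodup keys by inserting its items into an accumulator
theorem pvRebuild (items : List (String × List String)) (acc : PySem.Dict String (PySem.Dict String Int))
    (hd : ∀ p ∈ items, acc.contains p.1 = false) (hn : (items.map Prod.fst).Nodup) :
    items.foldl (fun r p => r.insert p.1 (PySem.Dict.counter p.2)) acc
    = PySem.Dict.mk (acc.items ++ items.map (fun p => (p.1, PySem.Dict.counter p.2))) := by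
  induction items generalizing acc with
  | nil => simp
  | cons p items ih =>
      rw [List.foldl_cons, PySem.Dict.insert, if_neg (by simp [hd p (by simp)])]
      rw [ih]
      · simp
      · intro q hq
        simp only [PySem.Dict.contains, List.any_append, List.any_cons, List.any_nil]
        have h1 : acc.contains q.1 = false := hd q (by simp [hq])
        have hcons : List.map Prod.fst (p :: items) = p.1 :: items.map Prod.fst := rfl
        obtain ⟨hp1, hp2⟩ := List.nodup_cons.mp (hcons ▸ hn)
        have h2 : q.1 ≠ p.1 := fun e => hp1 (e ▸ List.mem_map_of_mem hq)
        simp only [PySem.Dict.contains] at h1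
        simp [h1, Ne.symm h2]
      · have hcons : List.map Prod.fst (p :: items) = p.1 :: items.map Prod.fst := rfl
        exact (List.nodup_cons.mp (hcons ▸ hn)).2

-- ===== VERDICT (by name: the statement is the Claim_ definition above) =====
theorem extract_kmer_context_spec : Claim_equal_extract_kmer_context := by
  intro sequence k _ _
  unfold Spec_extract_kmer_context extract_kmer_context extract_kmer_context_alt
  suffices h :
      (PySem.List.pyRange 0 (PySem.Str.len sequence - k) 1).foldl (fun kmer_counts i =>
        let kmer := PySem.Str.slice sequence (some i) (some (i + k))
        let next_char := pvNextChar sequence (i + k)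
        let kmer_counts :=
          if kmer_counts.contains kmer then kmer_counts
          else kmer_counts.insert kmer PySem.Dict.empty
        let inner := kmer_counts.getD kmer PySem.Dict.empty
        let inner := if inner.contains next_char then inner else inner.insert next_char 0
        kmer_counts.insert kmer (inner.insert next_char (inner.getD next_char 0 + 1)))
        PySem.Dict.empty
      = (((PySem.List.pyRange 0 (PySem.Str.len sequence - k) 1).map (fun i =>
          (PySem.Str.slice sequence (some i) (some (i + k)), pvNextChar sequence (i + k)))).foldl
            (fun g p => g.modify p.1 [] (fun l => l ++ [p.2])) PySem.Dict.empty).items.foldl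
          (fun r p =>
            r.insert p.1 (p.2.foldl (fun cd c => cd.insert c (cd.getD c 0 + 1)) PySem.Dict.empty))
          (PySem.Dict.empty : PySem.Dict String (PySem.Dict String Int)) by
    simp only []
    exact congrArg (fun d => d.items.map (fun p => (p.1, p.2.items))) h
  have hbody : (fun (kmer_counts : PySem.Dict String (PySem.Dict String Int)) (i : Int) =>
      let kmer := PySem.Str.slice sequence (some i) (some (i + k))
      let next_char := pvNextChar sequence (i + k)
      let kmer_counts :=
        if kmer_counts.contains kmer then kmer_counts
        else kmer_counts.insert kmer PySem.Dict.empty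
      let inner := kmer_counts.getD kmer PySem.Dict.empty
      let inner := if inner.contains next_char then inner else inner.insert next_char 0
      kmer_counts.insert kmer (inner.insert next_char (inner.getD next_char 0 + 1)))
    = fun d i => d.modify (PySem.Str.slice sequence (some i) (some (i + k))) PySem.Dict.empty
        (fun inner => inner.modify (pvNextChar sequence (i + k)) 0 (· + 1)) := by
    funext d i
    exact pvStepA_eq d _ _
  rw [hbody]
  have hfus := pvFusion ((PySem.List.pyRange 0 (PySem.Str.len sequence - k) 1).map (fun i =>
      (PySem.Str.slice sequence (some i) (some (i + k)), pvNextChar sequence (i + k)))) PySem.Dict.empty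
  simp only [show (PySem.Dict.empty : PySem.Dict String (List String)).items = [] from rfl,
    List.map_nil,
    show PySem.Dict.mk ([] : List (String × PySem.Dict String Int)) = PySem.Dict.empty from rfl] at hfus
  rw [List.foldl_map] at hfus
  simp only [] at hfus
  rw [hfus]
  simp only [PySem.Dict.foldl_insert_getD_add_one_eq_counter]
  rw [pvRebuild _ _ (fun p _ => rfl)
    (pvKeys_nodup _ PySem.Dict.empty (by simp [PySem.Dict.empty]))]
  rfl
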